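-- pv_equiv track=rewrite | github.com/denisbilli/PyAdventOfCode24 | exercise10.py | find_char_in_grid
-- ===== SOURCE A (Python) =====
-- def get_matrix_dimensions(matrix):
--     """
--     Ottiene il numero di righe e colonne di una matrice.
--
--     Args:
--         matrix (list of list): Matrice rappresentata come una lista di liste.
--
--     Returns:
--         tuple: Numero di righe e numero di colonne (rows, cols).
--     """
--     rows = len(matrix)
--     cols = len(matrix[0]) if matrix else 0  # Verifica che la matrice non sia vuota
--     return rows, cols
--
-- def find_char_in_grid(grid, chars, known_positions=None):
--     if known_positions is None:
--         known_positions = []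
--     rows, cols = get_matrix_dimensions(grid)
--     positions = []
--     for row in range(rows):
--         for col in range(cols):
--             for char in chars:
--                 if grid[row][col] == char and not known_positions.__contains__((row, col)):
--                     positions.append((row, col))
--     return positions
-- ===== SOURCE B (Python) =====
-- def find_char_in_grid(grid, chars, known_positions=None):
--     if known_positions is None:
--         known_positions = []
--     cols = len(grid[0]) if grid else 0
--     index = {}
--     for r, row in enumerate(grid):
--         for c, cell in enumerate(row[:cols]):
--             index.setdefault(cell, []).append((r, c))
--     hits = []
--     for ch in chars:
--         for p in index.get(ch, []):
--             if p not in known_positions: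
--                 hits.append(p)
--     hits.sort()
--     return hits
-- ===== Notes on version B (the rewrite author's own statement) =====
-- stated objective: alternative
-- what changed: Replaced A's row-by-row triple scan (every cell compared against every element of chars) by an inverted index built in one pass over the grid (char value -> list of its cells), from which the hits are collected per requested char and then sorted into row-major order.
import Mathlib
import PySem

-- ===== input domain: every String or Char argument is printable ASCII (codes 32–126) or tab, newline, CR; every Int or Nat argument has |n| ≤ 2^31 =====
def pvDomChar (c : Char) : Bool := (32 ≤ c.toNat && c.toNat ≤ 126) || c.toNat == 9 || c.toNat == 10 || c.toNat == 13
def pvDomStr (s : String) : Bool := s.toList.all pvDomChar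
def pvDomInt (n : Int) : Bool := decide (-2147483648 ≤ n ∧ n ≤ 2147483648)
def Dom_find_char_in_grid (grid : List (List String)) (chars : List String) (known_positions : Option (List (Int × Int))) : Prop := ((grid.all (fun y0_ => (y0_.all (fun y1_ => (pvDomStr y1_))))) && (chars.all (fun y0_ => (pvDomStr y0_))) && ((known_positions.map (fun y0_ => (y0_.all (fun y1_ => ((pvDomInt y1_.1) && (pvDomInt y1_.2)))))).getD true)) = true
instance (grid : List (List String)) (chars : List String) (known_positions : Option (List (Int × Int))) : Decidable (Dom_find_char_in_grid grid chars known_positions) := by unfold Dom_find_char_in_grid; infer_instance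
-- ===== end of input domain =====

-- B replaces A's cell-by-cell triple scan by an inverted index (char value → its cells,
-- built in one pass), then collects the hits char-by-char and sorts them (objective: alternative).

-- ===== PORT A =====
-- grid[row][col] (none exactly where Python raises IndexError; Pre_ excludes that)
def pvCell (grid : List (List String)) (row col : Int) : Option String :=
  (PySem.List.pyGet? grid row).bind (fun line => PySem.List.pyGet? line col)

def find_char_in_grid (grid : List (List String)) (chars : List String) (known_positions : Option (List (Int × Int))) : List (Int × Int) :=
  let known := known_positions.getD []
  let rows : Int := grid.length
  let cols : Int := match grid with | [] => 0 | line :: _ => line.length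
  (PySem.List.pyRange 0 rows 1).foldl (fun acc row =>
    (PySem.List.pyRange 0 cols 1).foldl (fun acc col =>
      chars.foldl (fun acc ch =>
        match pvCell grid row col with
        | some s => if s == ch && !(known.contains (row, col)) then acc ++ [(row, col)] else acc
        | none => acc) acc) acc) []

-- ===== PORT B =====
def find_char_in_grid_alt (grid : List (List String)) (chars : List String) (known_positions : Option (List (Int × Int))) : List (Int × Int) :=
  let known := known_positions.getD []
  let cols : Int := match grid with | [] => 0 | line :: _ => line.length
  let index : PySem.Dict String (List (Int × Int)) :=
    (PySem.List.enumerate grid).foldl (fun d rp =>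
      (PySem.List.enumerate (PySem.List.slice rp.2 none (some cols))).foldl (fun d cp =>
        d.modify cp.2 [] (· ++ [(rp.1, cp.1)])) d) PySem.Dict.empty
  let hits : List (Int × Int) :=
    chars.foldl (fun acc ch =>
      (index.getD ch []).foldl (fun acc p =>
        if !(known.contains p) then acc ++ [p] else acc) acc) []
  PySem.List.sorted2 hits (fun p => p.1) (fun p => p.2)

-- ===== PRECONDITION & SPEC =====
-- Pre_ excludes exactly the inputs on which A raises IndexError: chars nonempty together with
-- a ragged grid having a row shorter than the first row (there A's grid[row][col] fails).
def Pre_find_char_in_grid (grid : List (List String)) (chars : List String) (known_positions : Option (List (Int × Int))) : Prop :=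
  chars = [] ∨ ∀ line ∈ grid, (grid.headD []).length ≤ line.length
instance (grid : List (List String)) (chars : List String) (known_positions : Option (List (Int × Int))) : Decidable (Pre_find_char_in_grid grid chars known_positions) := by unfold Pre_find_char_in_grid; infer_instance
def pvWitness_find_char_in_grid : List (List String) × List String × (Option (List (Int × Int))) :=
  ([["a", "b"], ["b", "c"]], ["b", "b"], some [((0 : Int), (1 : Int))])

def Spec_find_char_in_grid (grid : List (List String)) (chars : List String) (known_positions : Option (List (Int × Int))) (out : List (Int × Int)) : Prop := out = find_char_in_grid_alt grid chars known_positions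
instance (grid : List (List String)) (chars : List String) (known_positions : Option (List (Int × Int))) (out : List (Int × Int)) : Decidable (Spec_find_char_in_grid grid chars known_positions out) := by unfold Spec_find_char_in_grid; infer_instance

-- ===== CLAIM (what is proved, stated in full; the proofs are below) =====
def Claim_equal_find_char_in_grid : Prop := ∀ (grid : List (List String)) (chars : List String) (known_positions : Option (List (Int × Int))), Dom_find_char_in_grid grid chars known_positions → Pre_find_char_in_grid grid chars known_positions → Spec_find_char_in_grid grid chars known_positions (find_char_in_grid grid chars known_positions)
-- ===== LEMMAS AND PROOFS =====

-- the row-major list of cell coordinates A visits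
def pvCells (rows cols : Int) : List (Int × Int) :=
  (PySem.List.pyRange 0 rows 1).flatMap (fun r => (PySem.List.pyRange 0 cols 1).map (fun c => (r, c)))

-- the character stored at a cell (total variant; agrees with pvCell on in-range cells)
def pvVal (grid : List (List String)) (p : Int × Int) : String :=
  PySem.List.pyGetD (PySem.List.pyGetD grid p.1 []) p.2 ""

-- what both programs contribute for one cell (the shared normal form)
def pvOut (grid : List (List String)) (chars : List String) (known : List (Int × Int)) (p : Int × Int) : List (Int × Int) :=
  if known.contains p then [] else List.replicate (chars.count (pvVal grid p)) p

theorem cols_eq (grid : List (List String)) : (match grid with | [] => (0 : Int) | line :: _ => (line.length : Int)) = ((grid.headD []).length : Int) := by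
  cases grid <;> rfl

def pvCellOut (grid : List (List String)) (chars : List String) (known : List (Int × Int)) (row col : Int) : List (Int × Int) :=
  match pvCell grid row col with
  | some s => if known.contains (row, col) then [] else List.replicate (chars.count s) (row, col)
  | none => []

theorem pv_app (chars : List String) (s : String) (b : Bool) (p : Int × Int) (acc : List (Int × Int)) :
    chars.foldl (fun acc ch => if s == ch && b then acc ++ [p] else acc) acc
      = acc ++ (if b then List.replicate (chars.count s) p else []) := by
  cases b with
  | false =>
    rw [show (fun (acc : List (Int × Int)) ch => if s == ch && false then acc ++ [p] else acc)
        = fun acc _ => acc from by funext a c; simp]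
    rw [PySem.List.foldl_ignore]; simp
  | true =>
    rw [show (fun (acc : List (Int × Int)) ch => if s == ch && true then acc ++ [p] else acc)
        = fun acc ch => if (fun x => s == x) ch then acc ++ [p] else acc from by funext a c; simp]
    rw [PySem.List.foldl_append_if (fun x => s == x) (fun _ => p)]
    simp only [if_true]
    congr 1
    rw [List.map_const']
    congr 1
    rw [List.count, List.countP_eq_length_filter]
    congr 1
    apply List.filter_congr
    intro x _
    simp [eq_comm]

theorem innerA_eq (grid : List (List String)) (chars : List String) (known : List (Int × Int)) (row col : Int) (acc : List (Int × Int)) :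
    chars.foldl (fun acc ch =>
      match pvCell grid row col with
      | some s => if s == ch && !(known.contains (row, col)) then acc ++ [(row, col)] else acc
      | none => acc) acc = acc ++ pvCellOut grid chars known row col := by
  unfold pvCellOut
  cases h : pvCell grid row col with
  | none => rw [PySem.List.foldl_ignore]; simp
  | some s =>
    rw [pv_app chars s (!known.contains (row, col)) (row, col) acc]
    cases hk : known.contains (row, col) <;> simp

theorem foldl_foldl_eq {beta gamma : Type} (rs : List beta) (cs : List gamma)
    (F : List (Int × Int) → beta → gamma → List (Int × Int)) (G : beta → gamma → List (Int × Int))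
    (h : ∀ a r c, F a r c = a ++ G r c) (init : List (Int × Int)) :
    rs.foldl (fun acc r => cs.foldl (fun acc c => F acc r c) acc) init
      = init ++ rs.flatMap (fun r => cs.flatMap (G r)) := by
  have hin : ∀ r acc, cs.foldl (fun acc c => F acc r c) acc = acc ++ cs.flatMap (G r) := by
    intro r acc
    rw [show (fun (acc : List (Int × Int)) c => F acc r c) = (fun acc c => acc ++ G r c) from by
        funext a c; exact h a r c]
    exact PySem.List.foldl_append_eq_flatMap _ _ _
  rw [show (fun (acc : List (Int × Int)) r => cs.foldl (fun acc c => F acc r c) acc)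
      = (fun acc r => acc ++ cs.flatMap (G r)) from by funext a r; exact hin r a]
  exact PySem.List.foldl_append_eq_flatMap _ _ _

theorem A_normal_form (grid : List (List String)) (chars : List String) (kp : Option (List (Int × Int)))
    (h : ∀ line ∈ grid, (grid.headD []).length ≤ line.length) :
    find_char_in_grid grid chars kp
      = (pvCells grid.length ((grid.headD []).length : Int)).flatMap
          (pvOut grid chars (kp.getD [])) := by
  unfold find_char_in_grid
  rw [cols_eq grid]
  obtain ⟨known, hkn⟩ : ∃ k, kp.getD [] = k := ⟨_, rfl⟩
  rw [hkn]
  rw [foldl_foldl_eq _ _ _ (fun row col => pvCellOut grid chars known row col)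
      (fun a r c => innerA_eq grid chars known r c a) []]
  rw [List.nil_append]
  unfold pvCells
  rw [List.flatMap_assoc]
  apply List.flatMap_congr
  intro r hr
  rw [List.flatMap_map]
  apply List.flatMap_congr
  intro c hc
  rw [PySem.List.mem_pyRange_one] at hr hc
  -- pvCellOut = pvOut (r,c) under bounds
  have hgne : grid ≠ [] := by
    intro hg; rw [hg] at hr; simp at hr; omega
  have hrlt : (r.toNat) < grid.length := by omega
  have hline : PySem.List.pyGet? grid r = some grid[r.toNat] :=
    PySem.List.pyGet?_eq_some_getElem grid hr.1 (by omega)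
  have hlen : ((grid.headD []).length : Int) ≤ (grid[r.toNat]).length := by
    have := h grid[r.toNat] (List.getElem_mem hrlt)
    exact_mod_cast this
  have hcell : pvCell grid r c = some (grid[r.toNat][c.toNat]'(by omega)) := by
    unfold pvCell
    rw [hline]
    simp only [Option.bind_some]
    exact PySem.List.pyGet?_eq_some_getElem _ hc.1 (by omega)
  have hval : pvVal grid (r, c) = grid[r.toNat][c.toNat]'(by omega) := by
    unfold pvVal
    simp only
    rw [PySem.List.pyGetD_eq_getElem grid [] hr.1 (by omega),
        PySem.List.pyGetD_eq_getElem _ "" hc.1 (by omega)]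
  unfold pvCellOut pvOut
  rw [hcell, hval]

-- the inverted index's entry for ch lists exactly the cells holding ch, in row-major order
theorem index_getD (grid : List (List String)) (ch : String) (cols : Nat)
    (h : ∀ line ∈ grid, cols ≤ line.length) :
    ((PySem.List.enumerate grid).foldl (fun d rp =>
      (PySem.List.enumerate (PySem.List.slice rp.2 none (some (cols : Int)))).foldl (fun d cp =>
        d.modify cp.2 [] (· ++ [(rp.1, cp.1)])) d) PySem.Dict.empty).getD ch []
    = (pvCells grid.length (cols : Int)).filter (fun p => pvVal grid p == ch) := by
  have hstep : ∀ (d : PySem.Dict String (List (Int × Int))) (rp : Int × List String),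
      (PySem.List.enumerate (PySem.List.slice rp.2 none (some (cols : Int)))).foldl (fun d cp =>
        d.modify cp.2 [] (· ++ [(rp.1, cp.1)])) d
      = ((PySem.List.enumerate (PySem.List.slice rp.2 none (some (cols : Int)))).map
          (fun cp => (cp.2, (rp.1, cp.1)))).foldl (fun d p => d.modify p.1 [] (· ++ [p.2])) d := by
    intro d rp
    rw [List.foldl_map]
  have hflat := PySem.List.foldl_congr_mem (l := PySem.List.enumerate grid)
      (init := (PySem.Dict.empty : PySem.Dict String (List (Int × Int))))
      (f := fun d rp =>
        (PySem.List.enumerate (PySem.List.slice rp.2 none (some (cols : Int)))).foldl (fun d cp =>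
          d.modify cp.2 [] (· ++ [(rp.1, cp.1)])) d)
      (g := fun d rp =>
        ((PySem.List.enumerate (PySem.List.slice rp.2 none (some (cols : Int)))).map
            (fun cp => (cp.2, (rp.1, cp.1)))).foldl (fun d p => d.modify p.1 [] (· ++ [p.2])) d)
      (fun d rp _ => hstep d rp)
  rw [hflat, ← List.foldl_flatMap]
  rw [PySem.Dict.getD_foldl_modify_append]
  have hempty : (PySem.Dict.empty (κ := String) (ν := List (Int × Int))).getD ch [] = [] := rfl
  rw [hempty, List.nil_append]
  have hpairs : ((PySem.List.enumerate grid).flatMap (fun rp =>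
      (PySem.List.enumerate (PySem.List.slice rp.2 none (some (cols : Int)))).map
        (fun cp => (cp.2, (rp.1, cp.1)))))
      = (pvCells grid.length (cols : Int)).map (fun p => (pvVal grid p, p)) := by
    rw [PySem.List.enumerate_eq_map_pyRange grid []]
    rw [List.flatMap_map]
    unfold pvCells
    rw [List.map_flatMap]
    simp only [PySem.List.len]
    apply List.flatMap_congr
    intro r hr
    rw [PySem.List.mem_pyRange_one] at hr
    have hrow : PySem.List.pyGetD grid r [] = grid[r.toNat]'(by omega) :=
      PySem.List.pyGetD_eq_getElem grid [] hr.1 (by omega)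
    have hlen : cols ≤ (grid[r.toNat]'(by omega)).length := h _ (List.getElem_mem (by omega))
    rw [hrow, PySem.List.slice_to _ (by positivity)]
    rw [Int.toNat_natCast]
    rw [PySem.List.enumerate_eq_map_pyRange _ ""]
    rw [List.map_map, List.map_map]
    simp only [PySem.List.len, List.length_take]
    have hmin : (min cols (grid[r.toNat]'(by omega)).length) = cols := by omega
    rw [hmin]
    apply List.map_congr_left
    intro c hc
    rw [PySem.List.mem_pyRange_one] at hc
    simp only [Function.comp]
    have hgetc : PySem.List.pyGetD ((grid[r.toNat]'(by omega)).take cols) c ""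
        = PySem.List.pyGetD (grid[r.toNat]'(by omega)) c "" := by
      rw [PySem.List.pyGetD_eq_getElem _ "" hc.1 (by simp; omega),
          PySem.List.pyGetD_eq_getElem _ "" hc.1 (by omega)]
      rw [List.getElem_take]
    rw [hgetc]
    unfold pvVal
    simp only
    rw [hrow]
  rw [hpairs, List.filter_map, List.map_map]
  simp [Function.comp_def]

def pvR (a b : Int × Int) : Prop := a.1 < b.1 ∨ (a.1 = b.1 ∧ a.2 ≤ b.2)

def pvLt (a b : Int × Int) : Bool :=
  decide (a.1 < b.1) || (!decide (b.1 < a.1) && decide (a.2 < b.2))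

theorem pv_hits_eq (chars : List String) (I : String → List (Int × Int)) (known : List (Int × Int)) :
    chars.foldl (fun acc ch =>
      (I ch).foldl (fun acc p => if !(known.contains p) then acc ++ [p] else acc) acc) []
    = chars.flatMap (fun ch => (I ch).filter (fun p => !(known.contains p))) := by
  have hin : ∀ (ch : String) (acc : List (Int × Int)),
      (I ch).foldl (fun acc p => if !(known.contains p) then acc ++ [p] else acc) acc
        = acc ++ (I ch).filter (fun p => !(known.contains p)) := by
    intro ch acc
    exact PySem.List.foldl_append_if_eq_filter _ _ _
  have := PySem.List.foldl_congr_mem (l := chars) (init := ([] : List (Int × Int)))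
      (f := fun acc ch => (I ch).foldl (fun acc p => if !(known.contains p) then acc ++ [p] else acc) acc)
      (g := fun acc ch => acc ++ (I ch).filter (fun p => !(known.contains p)))
      (fun acc ch _ => hin ch acc)
  rw [this, PySem.List.foldl_append_eq_flatMap, List.nil_append]

theorem pv_flatMap_singleton (chars : List String) (s : String) (b : Bool) (p : Int × Int) :
    chars.flatMap (fun ch => if (s == ch && b) = true then [p] else [])
      = if b then List.replicate (chars.count s) p else [] := by
  cases b with
  | false => simp
  | true =>
    induction chars with
    | nil => simp
    | cons c cs ih =>
      rw [List.flatMap_cons, ih, List.count_cons]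
      by_cases hc : s = c
      · subst hc
        simp [List.replicate_succ]
      · have : (c == s) = false := by simp [Ne.symm hc]
        simp [hc, this]

theorem pv_perm_group (chars : List String) (cells : List (Int × Int))
    (v : Int × Int → String) (pred : Int × Int → Bool) :
    (chars.flatMap (fun ch => cells.filter (fun p => v p == ch && pred p))).Perm
      (cells.flatMap (fun p => if pred p then List.replicate (chars.count (v p)) p else [])) := by
  induction cells with
  | nil => simp
  | cons p rest ih =>
    have hsplit : ∀ ch, (p :: rest).filter (fun q => v q == ch && pred q)
        = (if (v p == ch && pred p) = true then [p] else []) ++ rest.filter (fun q => v q == ch && pred q) := by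
      intro ch
      rw [List.filter_cons]
      split <;> simp
    have h1 : chars.flatMap (fun ch => (p :: rest).filter (fun q => v q == ch && pred q))
        = chars.flatMap (fun ch => (if (v p == ch && pred p) = true then [p] else [])
            ++ rest.filter (fun q => v q == ch && pred q)) :=
      List.flatMap_congr (fun ch _ => hsplit ch)
    rw [h1, List.flatMap_cons]
    refine (List.flatMap_append_perm chars _ _).symm.trans ?_
    rw [pv_flatMap_singleton]
    exact List.Perm.append_left _ ih

theorem pv_cells_pairwise (rows cols : Int) :
    (pvCells rows cols).Pairwise (fun a b => a.1 < b.1 ∨ (a.1 = b.1 ∧ a.2 < b.2)) := by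
  unfold pvCells
  rw [List.pairwise_flatMap]
  constructor
  · intro r _
    rw [List.pairwise_map]
    exact (PySem.List.pairwise_lt_pyRange_one 0 cols).imp (fun h => Or.inr ⟨rfl, h⟩)
  · refine (PySem.List.pairwise_lt_pyRange_one 0 rows).imp ?_
    intro r1 r2 hlt x hx y hy
    rw [List.mem_map] at hx hy
    obtain ⟨c1, _, rfl⟩ := hx
    obtain ⟨c2, _, rfl⟩ := hy
    exact Or.inl hlt

theorem pv_out_pairwise (cells : List (Int × Int)) (O : Int × Int → List (Int × Int))
    (hO : ∀ p a, a ∈ O p → a = p)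
    (hc : cells.Pairwise (fun a b => a.1 < b.1 ∨ (a.1 = b.1 ∧ a.2 < b.2))) :
    (cells.flatMap O).Pairwise pvR := by
  rw [List.pairwise_flatMap]
  constructor
  · intro p _
    apply List.Pairwise.imp (R := fun a b : Int × Int => a = p ∧ b = p)
    · rintro a b ⟨rfl, rfl⟩
      right; exact ⟨rfl, le_refl _⟩
    · rw [List.pairwise_iff_forall_sublist]
      intro a b hs
      have := hs.subset
      exact ⟨hO p a (this (by simp)), hO p b (this (by simp))⟩
  · refine hc.imp ?_
    intro p q hpq x hx y hy
    rw [hO p x hx, hO q y hy]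
    rcases hpq with h | ⟨h1, h2⟩
    · exact Or.inl h
    · exact Or.inr ⟨h1, le_of_lt h2⟩

theorem pv_insertBy_pairwise (x : Int × Int) (ys : List (Int × Int)) (h : ys.Pairwise pvR) :
    (PySem.List.insertBy pvLt x ys).Pairwise pvR := by
  induction ys with
  | nil => simp [PySem.List.insertBy]
  | cons y ys ih =>
    rw [List.pairwise_cons] at h
    obtain ⟨hy, hys⟩ := h
    show (if pvLt x y = true then x :: y :: ys else y :: PySem.List.insertBy pvLt x ys).Pairwise pvR
    split
    · next hlt =>
      have hxy : pvR x y := by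
        obtain ⟨x1, x2⟩ := x; obtain ⟨y1, y2⟩ := y
        simp [pvLt] at hlt; unfold pvR; simp only; omega
      constructor
      · intro z hz
        rcases List.mem_cons.mp hz with rfl | hz
        · exact hxy
        · have hyz := hy z hz
          obtain ⟨x1, x2⟩ := x; obtain ⟨y1, y2⟩ := y; obtain ⟨z1, z2⟩ := z
          unfold pvR at hyz ⊢; simp only at hyz ⊢
          rcases hxy with h | h <;> rcases hyz with h' | h' <;> simp only at h h' <;> omega
      · exact List.pairwise_cons.mpr ⟨hy, hys⟩
    · next hnlt =>
      have hyx : pvR y x := by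
        obtain ⟨x1, x2⟩ := x; obtain ⟨y1, y2⟩ := y
        simp [pvLt] at hnlt; unfold pvR; simp only; omega
      constructor
      · intro z hz
        rw [PySem.List.mem_insertBy] at hz
        rcases hz with rfl | hz
        · exact hyx
        · exact hy z hz
      · exact ih hys

theorem pv_sorted2_eq (hits ys : List (Int × Int)) (hperm : ys.Perm hits) (hys : ys.Pairwise pvR) :
    PySem.List.sorted2 hits (fun p => p.1) (fun p => p.2) = ys := by
  have hunf : PySem.List.sorted2 hits (fun p => p.1) (fun p => p.2)
      = hits.foldl (fun acc x => PySem.List.insertBy pvLt x acc) [] := rfl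
  have hsorted : ∀ (l acc : List (Int × Int)), acc.Pairwise pvR →
      (l.foldl (fun acc x => PySem.List.insertBy pvLt x acc) acc).Pairwise pvR := by
    intro l
    induction l with
    | nil => intro acc h; exact h
    | cons x xs ih => intro acc h; exact ih _ (pv_insertBy_pairwise x acc h)
  refine List.Perm.eq_of_pairwise ?_ (hunf ▸ hsorted hits [] (by simp)) hys
      (((PySem.List.sorted2_perm hits _ _ false).trans hperm.symm))
  intro a b _ _ hab hba
  obtain ⟨a1, a2⟩ := a; obtain ⟨b1, b2⟩ := b
  unfold pvR at hab hba; simp only at hab hba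
  have : a1 = b1 ∧ a2 = b2 := by omega
  simp [this.1, this.2]


theorem main_eq (grid : List (List String)) (chars : List String) (kp : Option (List (Int × Int)))
    (hlen : ∀ line ∈ grid, (grid.headD []).length ≤ line.length) :
    find_char_in_grid grid chars kp = find_char_in_grid_alt grid chars kp := by
  rw [A_normal_form grid chars kp hlen]
  have halt : find_char_in_grid_alt grid chars kp
      = PySem.List.sorted2
          (chars.foldl (fun acc ch =>
            (((PySem.List.enumerate grid).foldl (fun d rp =>
                (PySem.List.enumerate (PySem.List.slice rp.2 none (some (match grid with | [] => (0 : Int) | line :: _ => (line.length : Int))))).foldl (fun d cp =>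
                  d.modify cp.2 [] (· ++ [(rp.1, cp.1)])) d) PySem.Dict.empty).getD ch []).foldl
              (fun acc p => if !((kp.getD []).contains p) then acc ++ [p] else acc) acc) [])
          (fun p => p.1) (fun p => p.2) := rfl
  rw [halt, cols_eq grid]
  obtain ⟨known, hkn⟩ : ∃ k, kp.getD [] = k := ⟨_, rfl⟩
  rw [hkn]
  rw [pv_hits_eq chars _ known]
  have hbody : ∀ ch ∈ chars,
      ((((PySem.List.enumerate grid).foldl (fun d rp =>
        (PySem.List.enumerate (PySem.List.slice rp.2 none (some ((grid.headD []).length : Int)))).foldl (fun d cp =>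
          d.modify cp.2 [] (· ++ [(rp.1, cp.1)])) d) PySem.Dict.empty).getD ch []).filter
            (fun p => !(known.contains p)))
      = (pvCells grid.length ((grid.headD []).length : Int)).filter
          (fun p => pvVal grid p == ch && !(known.contains p)) := by
    intro ch _
    rw [index_getD grid ch (grid.headD []).length hlen]
    rw [List.filter_filter]
    apply List.filter_congr
    intro p _
    rw [Bool.and_comm]
  rw [List.flatMap_congr hbody]
  symm
  apply pv_sorted2_eq
  · refine List.Perm.symm ((pv_perm_group chars _ (pvVal grid) (fun p => !(known.contains p))).trans ?_)
    apply List.Perm.of_eq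
    apply List.flatMap_congr
    intro p _
    unfold pvOut
    cases hk : known.contains p <;> simp
  · apply pv_out_pairwise
    · intro p a ha
      unfold pvOut at ha
      split at ha
      · simp at ha
      · exact List.eq_of_mem_replicate ha
    · exact pv_cells_pairwise _ _

theorem empty_chars_eq (grid : List (List String)) (kp : Option (List (Int × Int))) :
    find_char_in_grid grid [] kp = find_char_in_grid_alt grid [] kp := by
  have hA : find_char_in_grid grid [] kp = [] := by
    unfold find_char_in_grid
    simp only [List.foldl_nil, PySem.List.foldl_ignore]
  have hB : find_char_in_grid_alt grid [] kp = [] := by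
    unfold find_char_in_grid_alt
    simp only [List.foldl_nil]
    rfl
  rw [hA, hB]

-- ===== VERDICT (by name: the statement is the Claim_ definition above) =====
theorem find_char_in_grid_spec : Claim_equal_find_char_in_grid := by
  intro grid chars kp _ hpre
  unfold Spec_find_char_in_grid
  by_cases hch : chars = []
  · subst hch; exact empty_chars_eq grid kp
  · exact main_eq grid chars kp (hpre.resolve_left hch)
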